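-- pv_equiv track=rewrite | github.com/cloudpassion/codeline | challenge/song_decoder.py | song_decoder
-- ===== SOURCE A (Python) =====
-- def song_decoder(_text):
--     _ret, _next = '', ''
--     n = 0
--     ftry = True
--     while n < len(_text):
--
--         _next = _text[n:n+3]
--         while _next == "WUB":
--             n += 3
--             try: _next = _text[n:n+3]
--             except: break
--             continue
--         if ftry: ftry = False
--         else:
--             if _text[n-3:n] == "WUB" and n < len(_text): _ret += ' '
--         try: _ret += _text[n]
--         except: break
--         n += 1
--     return _ret
-- ===== SOURCE B (Python) =====
-- def song_decoder(_text):
--     return ' '.join(filter(None, _text.split('WUB')))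
-- ===== Notes on version B (the rewrite author's own statement) =====
-- stated objective: simpler
-- what changed: Replaces the manual index scan with its nested separator-skipping loop, look-back slice and per-character string concatenation by tokenize-filter-join: split on the separator, drop empty tokens, join with single spaces.
import Mathlib
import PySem

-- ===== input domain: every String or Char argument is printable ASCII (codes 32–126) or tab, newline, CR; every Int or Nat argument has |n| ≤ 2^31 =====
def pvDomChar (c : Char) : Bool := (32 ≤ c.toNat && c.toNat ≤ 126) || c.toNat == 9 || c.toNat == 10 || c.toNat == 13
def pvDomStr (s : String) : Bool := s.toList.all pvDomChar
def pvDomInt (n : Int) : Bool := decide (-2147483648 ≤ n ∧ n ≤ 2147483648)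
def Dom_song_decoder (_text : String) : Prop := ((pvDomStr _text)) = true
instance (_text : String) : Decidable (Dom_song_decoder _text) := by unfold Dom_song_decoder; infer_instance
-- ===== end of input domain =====

-- B replaces A's manual index scan (with nested WUB-skipping loop and look-back slice)
-- by tokenize-filter-join: split on "WUB", drop empty tokens, join with single spaces.


-- ===== PORT A =====
-- the constant string "WUB" as a character list
def pvW : List Char := ['W', 'U', 'B']

-- termination fact for the inner `while _next == "WUB"` loop: a 3-slice equal to "WUB" lies fully inside the text
theorem pvSliceW_le (cs : List Char) (n : Nat)
    (h : PySem.List.slice cs (some (n : Int)) (some ((n : Int) + 3)) = pvW) : n + 3 ≤ cs.length := by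
  have hs : PySem.List.slice cs (some (n : Int)) (some ((n : Int) + 3)) = (cs.drop n).take 3 := by
    have := PySem.List.slice_natCast_add cs n 3
    simpa using this
  rw [hs] at h
  have hlen := congrArg List.length h
  simp [pvW] at hlen
  omega

-- the inner `while _next == "WUB": n += 3` loop of A
def skipA (cs : List Char) (n : Nat) : Nat :=
  if h : PySem.List.slice cs (some (n : Int)) (some ((n : Int) + 3)) = pvW then skipA cs (n + 3) else n
termination_by cs.length - n
decreasing_by have := pvSliceW_le cs n h; omega

theorem skipA_ge (cs : List Char) (n : Nat) : n ≤ skipA cs n := by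
  induction n using skipA.induct (cs := cs) with
  | case1 n h ih => rw [skipA]; simp only [h, dif_pos]; omega
  | case2 n h => rw [skipA]; simp [h]

-- the `if _text[n-3:n] == "WUB" and n < len(_text): _ret += ' '` step of A
-- (after the inner skipping loop; ftry suppresses it on the first word)
def retStep (cs : List Char) (n : Nat) (ftry : Bool) (ret : List Char) : List Char :=
  if ftry then ret
  else if PySem.List.slice cs (some ((skipA cs n : Int) - 3)) (some (skipA cs n : Int)) = pvW
            ∧ skipA cs n < cs.length
    then ret ++ [' '] else ret

-- the outer `while n < len(_text)` loop of A (state: n, ftry, _ret); the dead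
-- try/except around the slicing is dropped (Python slicing never raises)
def loopA (cs : List Char) (n : Nat) (ftry : Bool) (ret : List Char) : List Char :=
  if _h : n < cs.length then
    match PySem.List.pyGet? cs (skipA cs n : Int) with
    | none => retStep cs n ftry ret                  -- `_ret += _text[n]` raised IndexError: break
    | some c => loopA cs (skipA cs n + 1) false (retStep cs n ftry ret ++ [c])
  else ret
termination_by cs.length - n
decreasing_by have := skipA_ge cs n; omega

def song_decoder (_text : String) : String :=
  String.ofList (loopA _text.toList 0 true [])

-- ===== PORT B =====
def song_decoder_alt (_text : String) : String :=
  match PySem.Str.split? _text "WUB" with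
  | some parts => PySem.Str.join " " (parts.filter (fun p => p ≠ ""))
  | none => ""   -- unreachable: the separator "WUB" is nonempty

-- ===== PRECONDITION & SPEC =====
def Spec_song_decoder (_text : String) (out : String) : Prop := out = song_decoder_alt _text
instance (_text : String) (out : String) : Decidable (Spec_song_decoder _text out) := by unfold Spec_song_decoder; infer_instance

-- ===== CLAIM (what is proved, stated in full; the proofs are below) =====
def Claim_equal_song_decoder : Prop := ∀ (_text : String), Dom_song_decoder _text → Spec_song_decoder _text (song_decoder _text)

-- ===== LEMMAS AND PROOFS =====

theorem take3_iff (t : List Char) : t.take 3 = pvW ↔ pvW <+: t := by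
  constructor
  · intro h; rw [← h]; exact List.take_prefix 3 t
  · rintro ⟨s, rfl⟩; simp [pvW]

theorem sliceA_iff (cs : List Char) (n : Nat) :
    PySem.List.slice cs (some (n : Int)) (some ((n : Int) + 3)) = pvW ↔ pvW <+: cs.drop n := by
  have hs : PySem.List.slice cs (some (n : Int)) (some ((n : Int) + 3)) = (cs.drop n).take 3 := by
    simpa using PySem.List.slice_natCast_add cs n 3
  rw [hs, take3_iff]

theorem sliceW_iff (cs : List Char) (n : Nat) (h3 : 3 ≤ n) :
    PySem.List.slice cs (some ((n : Int) - 3)) (some (n : Int)) = pvW ↔ pvW <+: cs.drop (n - 3) := by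
  have e1 : (n : Int) - 3 = ((n - 3 : Nat) : Int) := by omega
  have e2 : (n : Int) = ((n - 3 : Nat) : Int) + ((3 : Nat) : Int) := by omega
  rw [e1, e2, PySem.List.slice_natCast_add, take3_iff]

theorem slice_small_ne (cs : List Char) (n : Nat) (h : n < 3) (hn : n < cs.length) :
    PySem.List.slice cs (some ((n : Int) - 3)) (some (n : Int)) ≠ pvW := by
  intro hW
  have hlen := congrArg List.length hW
  rw [PySem.List.length_slice] at hlen
  have e1 : (n : Int) - 3 = -(((3 - n : Nat)) : Int) := by omega
  have h1 : PySem.List.clampIdx cs.length ((n : Int) - 3) = cs.length - (3 - n) := by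
    rw [e1, PySem.List.clampIdx_neg_natCast]; omega
  have h2 : PySem.List.clampIdx cs.length (n : Int) = min n cs.length := PySem.List.clampIdx_natCast _ _
  rw [h1, h2] at hlen
  simp [pvW] at hlen
  omega

-- ---- skipA characterisation ----

theorem skipA_stop (cs : List Char) (n : Nat) : ¬ pvW <+: cs.drop (skipA cs n) := by
  induction n using skipA.induct (cs := cs) with
  | case1 n h ih => rw [skipA]; simpa [h] using ih
  | case2 n h => rw [skipA]; simpa [h] using (sliceA_iff cs n).not.mp h

theorem skipA_eq_self (cs : List Char) (n : Nat) (h : ¬ pvW <+: cs.drop n) : skipA cs n = n := by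
  rw [skipA]; simp [(sliceA_iff cs n).not.mpr h]

theorem skipA_last (cs : List Char) (n : Nat) (h : n < skipA cs n) :
    n + 3 ≤ skipA cs n ∧ pvW <+: cs.drop (skipA cs n - 3) := by
  induction n using skipA.induct (cs := cs) with
  | case1 n hsl ih =>
    have hpre := (sliceA_iff cs n).mp hsl
    rw [skipA] at h ⊢
    simp only [hsl, dif_pos] at h ⊢
    by_cases h2 : n + 3 < skipA cs (n + 3)
    · have := ih h2; exact ⟨by omega, this.2⟩
    · have hle := skipA_ge cs (n + 3)
      have heq : skipA cs (n + 3) = n + 3 := by omega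
      rw [heq]; exact ⟨le_refl _, by simpa using hpre⟩
  | case2 n hsl => rw [skipA] at h; simp [hsl] at h

-- ---- suffix-level skipping loop ----

def skipT (t : List Char) : List Char :=
  if h : pvW <+: t then skipT (t.drop 3) else t
termination_by t.length
decreasing_by obtain ⟨s, rfl⟩ := h; simp [pvW]; omega

theorem skipT_length_le (t : List Char) : (skipT t).length ≤ t.length := by
  induction t using skipT.induct with
  | case1 t h ih =>
    rw [skipT]; simp only [h, dif_pos]
    simp only [List.length_drop] at ih; omega
  | case2 t h => rw [skipT]; simp [h]

theorem skipT_eq_self (t : List Char) (h : ¬ pvW <+: t) : skipT t = t := by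
  rw [skipT]; simp [h]

theorem skipT_drop3 (t : List Char) (h : pvW <+: t) : skipT t = skipT (t.drop 3) := by
  rw [skipT]; simp [h]

theorem skipT_nil : skipT ([] : List Char) = [] :=
  skipT_eq_self [] (by simp [pvW])

theorem skipA_drop (cs : List Char) (n : Nat) : cs.drop (skipA cs n) = skipT (cs.drop n) := by
  induction n using skipA.induct (cs := cs) with
  | case1 n h ih =>
    have hpre := (sliceA_iff cs n).mp h
    rw [skipA]; simp only [h, dif_pos]
    rw [ih, ← List.drop_drop, ← skipT_drop3 _ hpre]
  | case2 n h =>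
    have hpre := (sliceA_iff cs n).not.mp h
    rw [skipA]; simp only [h, dif_neg, not_false_iff]
    rw [skipT_eq_self _ hpre]

-- ---- the words A emits from a suffix, first-word (gT) and later-word (gFalse) form ----

def gT (t : List Char) : List Char :=
  match h : skipT t with
  | [] => []
  | c :: u' => c :: ((if pvW <+: u' ∧ skipT u' ≠ [] then [' '] else []) ++ gT u')
termination_by t.length
decreasing_by
  have h1 := skipT_length_le t
  have h2 := congrArg List.length h
  simp at h2; omega

def gFalse (t : List Char) : List Char :=
  (if pvW <+: t ∧ skipT t ≠ [] then [' '] else []) ++ gT t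

theorem gT_nil (t : List Char) (h : skipT t = []) : gT t = [] := by
  rw [gT.eq_def]; split <;> simp_all

theorem gT_cons (t : List Char) (c : Char) (u' : List Char) (h : skipT t = c :: u') :
    gT t = c :: gFalse u' := by
  rw [gT.eq_def]; split <;> simp_all [gFalse]

theorem gT_congr (a b : List Char) (h : skipT a = skipT b) : gT a = gT b := by
  cases hc : skipT a with
  | nil => rw [gT_nil a hc, gT_nil b (h ▸ hc)]
  | cons c u' => rw [gT_cons a c u' hc, gT_cons b c u' (h ▸ hc)]

-- ---- the loop invariant: no WUB occurrence ends in the last ≤ 2 consumed positions ----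

def KInv (cs : List Char) (n : Nat) : Prop :=
  ∀ p : Nat, p < n → n ≤ p + 3 → ¬ pvW <+: cs.drop p

theorem KInv_zero (cs : List Char) : KInv cs 0 := by
  intro p hp _; omega

theorem prefix_interior (cs : List Char) (q : Nat) (h : pvW <+: cs.drop q) :
    ¬ pvW <+: cs.drop (q + 1) ∧ ¬ pvW <+: cs.drop (q + 2) := by
  obtain ⟨s, hs⟩ := h
  have h1 : cs.drop (q + 1) = 'U' :: 'B' :: s := by
    have hd : cs.drop (q + 1) = (cs.drop q).drop 1 := by rw [List.drop_drop]
    rw [hd, ← hs]; simp [pvW]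
  have h2 : cs.drop (q + 2) = 'B' :: s := by
    have hd : cs.drop (q + 2) = (cs.drop q).drop 2 := by rw [List.drop_drop]
    rw [hd, ← hs]; simp [pvW]
  constructor
  · rw [h1]; intro hpre; rw [pvW, List.cons_prefix_cons] at hpre; simp at hpre
  · rw [h2]; intro hpre; rw [pvW, List.cons_prefix_cons] at hpre; simp at hpre

theorem KM (cs : List Char) (n : Nat) (hK : KInv cs n) : KInv cs (skipA cs n + 1) := by
  intro p hp hle
  by_cases hmn : skipA cs n = n
  · rcases Nat.lt_or_ge p n with hpn | hpn
    · exact hK p hpn (by omega)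
    · have hpn' : p = skipA cs n := by omega
      subst hpn'; exact skipA_stop cs n
  · have hlt : n < skipA cs n := lt_of_le_of_ne (skipA_ge cs n) (Ne.symm hmn)
    obtain ⟨h3, hpre⟩ := skipA_last cs n hlt
    have hint := prefix_interior cs (skipA cs n - 3) hpre
    rcases Nat.lt_or_ge p (skipA cs n) with hpm | hpm
    · rcases Nat.lt_or_ge p (skipA cs n - 1) with hpm1 | hpm1
      · have hpe : p = (skipA cs n - 3) + 1 := by omega
        rw [hpe]; exact hint.1
      · have hpe : p = (skipA cs n - 3) + 2 := by omega
        rw [hpe]; exact hint.2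
    · have hpe : p = skipA cs n := by omega
      subst hpe; exact skipA_stop cs n

-- ---- the space condition of A, rewritten through the invariant ----

theorem space_cond (cs : List Char) (n : Nat) (hn : n < cs.length) (hK : KInv cs n) :
    ((PySem.List.slice cs (some ((skipA cs n : Int) - 3)) (some (skipA cs n : Int)) = pvW ∧
        skipA cs n < cs.length)
      ↔ (pvW <+: cs.drop n ∧ skipT (cs.drop n) ≠ [])) := by
  have hdrop : cs.drop (skipA cs n) = skipT (cs.drop n) := skipA_drop cs n
  have hlen : skipA cs n < cs.length ↔ skipT (cs.drop n) ≠ [] := by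
    rw [← hdrop]
    constructor
    · intro h hnil; rw [List.drop_eq_nil_iff] at hnil; omega
    · intro h; by_contra hge
      exact h (List.drop_eq_nil_iff.mpr (by omega))
  by_cases hmn : skipA cs n = n
  · have hnp : ¬ pvW <+: cs.drop n := hmn ▸ skipA_stop cs n
    constructor
    · rintro ⟨hsl, _⟩
      exfalso
      rw [hmn] at hsl
      rcases Nat.lt_or_ge n 3 with h3 | h3
      · exact slice_small_ne cs n h3 hn hsl
      · exact hK (n - 3) (by omega) (by omega) ((sliceW_iff cs n h3).mp hsl)
    · rintro ⟨hpre, _⟩; exact absurd hpre hnp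
  · have hlt : n < skipA cs n := lt_of_le_of_ne (skipA_ge cs n) (Ne.symm hmn)
    obtain ⟨h3, hpre3⟩ := skipA_last cs n hlt
    have hpren : pvW <+: cs.drop n := by
      by_contra hc; exact hmn (skipA_eq_self cs n hc)
    have hsl : PySem.List.slice cs (some ((skipA cs n : Int) - 3)) (some (skipA cs n : Int)) = pvW :=
      (sliceW_iff cs (skipA cs n) (by omega)).mpr hpre3
    simp [hsl, hpren, hlen]

-- ---- the main A-side lemma ----

theorem loopA_eq : ∀ (N : Nat) (cs : List Char) (n : Nat) (ret : List Char),
    cs.length - n ≤ N → KInv cs n → loopA cs n false ret = ret ++ gFalse (cs.drop n) := by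
  intro N
  induction N with
  | zero =>
    intro cs n ret hN hK
    rw [loopA]
    simp only [dif_neg (by omega : ¬ n < cs.length)]
    rw [List.drop_eq_nil_iff.mpr (by omega)]
    simp [gFalse, skipT_nil, gT_nil [] skipT_nil]
  | succ N ih =>
    intro cs n ret hN hK
    by_cases hn : n < cs.length
    · rw [loopA]
      simp only [dif_pos hn]
      have hdrop : cs.drop (skipA cs n) = skipT (cs.drop n) := skipA_drop cs n
      have hcond := space_cond cs n hn hK
      cases hget : PySem.List.pyGet? cs ((skipA cs n : Nat) : Int) with
      | none =>
        dsimp only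
        have hnone : cs[skipA cs n]? = none := by rw [← PySem.List.pyGet?_natCast]; exact hget
        have hlen : cs.length ≤ skipA cs n := List.getElem?_eq_none_iff.mp hnone
        have hnil : skipT (cs.drop n) = [] := by
          rw [← hdrop, List.drop_eq_nil_iff]; omega
        rw [retStep]
        simp only [Bool.false_eq_true, if_false]
        rw [if_neg (by rw [hcond]; simp [hnil])]
        simp [gFalse, hnil, gT_nil _ hnil]
      | some c =>
        dsimp only
        have hsome : cs[skipA cs n]? = some c := by rw [← PySem.List.pyGet?_natCast]; exact hget
        have hcons : cs.drop (skipA cs n) = c :: cs.drop (skipA cs n + 1) := by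
          have hh : (cs.drop (skipA cs n)).head? = some c := by rw [List.head?_drop]; exact hsome
          have ht : (cs.drop (skipA cs n)).tail = cs.drop (skipA cs n + 1) := List.tail_drop
          cases hd : cs.drop (skipA cs n) with
          | nil => rw [hd] at hh; simp at hh
          | cons x xs => rw [hd] at hh ht; simp at hh ht; rw [hh, ht]
        have hK' : KInv cs (skipA cs n + 1) := KM cs n hK
        rw [ih cs (skipA cs n + 1) _ (by have := skipA_ge cs n; omega) hK']
        have hstep : gFalse (cs.drop n) =
            (if pvW <+: cs.drop n ∧ skipT (cs.drop n) ≠ [] then [' '] else []) ++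
              (c :: gFalse (cs.drop (skipA cs n + 1))) := by
          rw [gFalse, gT_cons (cs.drop n) c (cs.drop (skipA cs n + 1)) (by rw [← hdrop]; exact hcons)]
        rw [hstep, retStep]
        simp only [Bool.false_eq_true, if_false]
        by_cases hsp : pvW <+: cs.drop n ∧ skipT (cs.drop n) ≠ []
        · rw [if_pos (hcond.mpr hsp), if_pos hsp]; simp
        · rw [if_neg (fun hc => hsp (hcond.mp hc)), if_neg hsp]; simp
    · rw [loopA]
      simp only [dif_neg hn]
      rw [List.drop_eq_nil_iff.mpr (by omega)]
      simp [gFalse, skipT_nil, gT_nil [] skipT_nil]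

theorem loopA_top (cs : List Char) : loopA cs 0 true [] = gT cs := by
  by_cases hn : 0 < cs.length
  · rw [loopA]
    simp only [dif_pos hn]
    have hdrop : cs.drop (skipA cs 0) = skipT cs := by
      have := skipA_drop cs 0; rwa [List.drop_zero] at this
    cases hget : PySem.List.pyGet? cs ((skipA cs 0 : Nat) : Int) with
    | none =>
      dsimp only
      have hnone : cs[skipA cs 0]? = none := by rw [← PySem.List.pyGet?_natCast]; exact hget
      have hlen : cs.length ≤ skipA cs 0 := List.getElem?_eq_none_iff.mp hnone
      have hnil : skipT cs = [] := by rw [← hdrop, List.drop_eq_nil_iff]; omega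
      rw [gT_nil cs hnil, retStep]
      simp
    | some c =>
      dsimp only
      have hsome : cs[skipA cs 0]? = some c := by rw [← PySem.List.pyGet?_natCast]; exact hget
      have hcons : cs.drop (skipA cs 0) = c :: cs.drop (skipA cs 0 + 1) := by
        have hh : (cs.drop (skipA cs 0)).head? = some c := by rw [List.head?_drop]; exact hsome
        have ht : (cs.drop (skipA cs 0)).tail = cs.drop (skipA cs 0 + 1) := List.tail_drop
        cases hd : cs.drop (skipA cs 0) with
        | nil => rw [hd] at hh; simp at hh
        | cons x xs => rw [hd] at hh ht; simp at hh ht; rw [hh, ht]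
      have hK' : KInv cs (skipA cs 0 + 1) := KM cs 0 (KInv_zero cs)
      rw [loopA_eq cs.length cs (skipA cs 0 + 1) _ (by omega) hK']
      rw [gT_cons cs c (cs.drop (skipA cs 0 + 1)) (by rw [← hdrop]; exact hcons)]
      rw [retStep]
      simp
  · rw [loopA]
    simp only [dif_neg hn]
    have hcs : cs = [] := by cases cs <;> simp_all
    subst hcs
    rw [gT_nil [] skipT_nil]

-- ---- B-side: a clean recursion computing Chars.splitOn with separator "WUB" ----

def myAux (t cur : List Char) : List (List Char) :=
  if h : pvW.isPrefixOf t then cur.reverse :: myAux (t.drop 3) []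
  else
    match t with
    | [] => [cur.reverse]
    | c :: rest => myAux rest (c :: cur)
termination_by t.length
decreasing_by
  · obtain ⟨s, rfl⟩ := List.isPrefixOf_iff_prefix.mp h; simp [pvW]; omega
  · simp

theorem go_spec : ∀ (fuel : Nat) (t cur : List Char) (acc : List (List Char)),
    t.length < fuel →
    PySem.Chars.splitOn.go pvW fuel t cur acc = acc.reverse ++ myAux t cur := by
  intro fuel
  induction fuel with
  | zero => intro t cur acc h; omega
  | succ fuel ih =>
    intro t cur acc h
    cases t with
    | nil =>
      rw [PySem.Chars.splitOn.go, myAux]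
      simp [pvW]
      omega
    | cons c rest =>
      rw [PySem.Chars.splitOn.go]
      by_cases hp : pvW.isPrefixOf (c :: rest)
      · simp only [hp, if_pos]
        rw [ih _ _ _ (by simp [pvW] at h ⊢; omega)]
        conv_rhs => rw [myAux]
        simp only [hp, dif_pos]
        simp [pvW]
      · simp only [hp, Bool.false_eq_true, if_false]
        rw [ih _ _ _ (by simp at h ⊢; omega)]
        conv_rhs => rw [myAux]
        simp [hp]

theorem splitOn_eq (t : List Char) : PySem.Chars.splitOn t pvW = myAux t [] := by
  rw [PySem.Chars.splitOn]
  rw [go_spec (t.length + 1) t [] [] (by omega)]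
  simp

theorem myAux_step (c : Char) (rest cur : List Char) (hp : ¬ pvW <+: (c :: rest)) :
    myAux (c :: rest) cur = myAux rest (c :: cur) := by
  rw [myAux]
  rw [dif_neg (fun hc => hp (List.isPrefixOf_iff_prefix.mp hc))]

theorem myAux_cur_aux : ∀ (N : Nat) (t : List Char), t.length ≤ N → ∀ cur,
    myAux t cur = (myAux t []).modifyHead (fun x => cur.reverse ++ x) := by
  intro N
  induction N with
  | zero =>
    intro t hN cur
    have ht : t = [] := by cases t <;> simp_all
    subst ht
    conv_lhs => rw [myAux]
    conv_rhs => rw [myAux]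
    simp [pvW]
  | succ N ih =>
    intro t hN cur
    by_cases hpre : pvW <+: t
    · conv_lhs => rw [myAux]
      conv_rhs => rw [myAux]
      simp [List.isPrefixOf_iff_prefix.mpr hpre]
    · cases t with
      | nil =>
        conv_lhs => rw [myAux]
        conv_rhs => rw [myAux]
        simp [pvW]
      | cons c rest =>
        have hr : rest.length ≤ N := by simp at hN; omega
        rw [myAux_step c rest cur hpre, myAux_step c rest [] hpre]
        rw [ih rest hr (c :: cur), ih rest hr [c], List.modifyHead_modifyHead]
        congr 1
        funext x
        simp

theorem myAux_cur (t : List Char) (cur : List Char) :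
    myAux t cur = (myAux t []).modifyHead (fun x => cur.reverse ++ x) :=
  myAux_cur_aux t.length t le_rfl cur

theorem myAux_ne_nil : ∀ (N : Nat) (t : List Char), t.length ≤ N → ∀ cur, myAux t cur ≠ [] := by
  intro N
  induction N with
  | zero =>
    intro t hN cur
    have ht : t = [] := by cases t <;> simp_all
    subst ht
    rw [myAux]; simp [pvW]
  | succ N ih =>
    intro t hN cur
    by_cases hpre : pvW <+: t
    · rw [myAux]; simp [List.isPrefixOf_iff_prefix.mpr hpre]
    · cases t with
      | nil => rw [myAux]; simp [pvW]
      | cons c rest =>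
        rw [myAux_step c rest cur hpre]
        exact ih rest (by simp at hN; omega) (c :: cur)

theorem S_ne_nil (t : List Char) : myAux t [] ≠ [] := myAux_ne_nil t.length t le_rfl []

theorem S_nil : myAux ([] : List Char) [] = [[]] := by
  rw [myAux]; simp [pvW]

theorem S_pre (t : List Char) (h : pvW <+: t) : myAux t [] = [] :: myAux (t.drop 3) [] := by
  rw [myAux]; simp [List.isPrefixOf_iff_prefix.mpr h]

theorem S_cons (c : Char) (r : List Char) (h : ¬ pvW <+: (c :: r)) :
    myAux (c :: r) [] = (myAux r []).modifyHead (fun x => c :: x) := by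
  rw [myAux]
  simp only [dif_neg (fun hc => h (List.isPrefixOf_iff_prefix.mp hc))]
  rw [myAux_cur r [c]]
  rfl

theorem E_iff (t : List Char) : ((myAux t []).filter (fun l => l ≠ []) = []) ↔ skipT t = [] := by
  induction t using skipT.induct with
  | case1 t h ih =>
    rw [S_pre t h, skipT_drop3 t h]
    simpa using ih
  | case2 t h =>
    rw [skipT_eq_self t h]
    cases t with
    | nil => simp [S_nil]
    | cons c r =>
      rw [S_cons c r h]
      obtain ⟨h', rest', hS⟩ : ∃ h' rest', myAux r [] = h' :: rest' := by
        cases hS : myAux r [] with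
        | nil => exact absurd hS (S_ne_nil r)
        | cons a b => exact ⟨a, b, rfl⟩
      rw [hS]
      simp

theorem inter_cons (a : List Char) (l : List (List Char)) :
    List.intercalate [' '] (a :: l) =
      a ++ (if l = [] then [] else [' '] ++ List.intercalate [' '] l) := by
  cases l with
  | nil => simp [List.intercalate]
  | cons b bs => simp [List.intercalate, List.intersperse]

-- join-as-continuation: what follows after a word already in progress
def Jn (rest : List (List Char)) : List Char :=
  if rest.filter (fun l => l ≠ []) = [] then []
  else [' '] ++ List.intercalate [' '] (rest.filter (fun l => l ≠ []))

theorem both_eq : ∀ (N : Nat) (t : List Char), t.length ≤ N →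
    (∀ h rest, myAux t [] = h :: rest → gFalse t = h ++ Jn rest) ∧
      gT t = List.intercalate [' '] ((myAux t []).filter (fun l => l ≠ [])) := by
  intro N
  induction N with
  | zero =>
    intro t hN
    have ht : t = [] := by cases t <;> simp_all
    subst ht
    constructor
    · intro h rest hrw
      rw [S_nil] at hrw
      injection hrw with h1 h2
      subst h1; subst h2
      rw [gFalse, gT_nil [] skipT_nil, if_neg (by simp [skipT_nil]), Jn]
      simp
    · rw [gT_nil [] skipT_nil, S_nil]
      simp [List.intercalate]
  | succ N ih =>
    intro t hN
    by_cases hpre : pvW <+: t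
    · -- separator at the front: both skipT and myAux step to t.drop 3
      have hlen3 : 3 ≤ t.length := by
        obtain ⟨s, rfl⟩ := hpre; simp [pvW]
      have hd : (t.drop 3).length ≤ N := by simp; omega
      have IH := ih (t.drop 3) hd
      have hsk : skipT t = skipT (t.drop 3) := skipT_drop3 t hpre
      have hgT : gT t = gT (t.drop 3) := gT_congr _ _ hsk
      have hS : myAux t [] = [] :: myAux (t.drop 3) [] := S_pre t hpre
      constructor
      · intro h rest hrw
        rw [hS] at hrw
        injection hrw with h1 h2
        subst h1; subst h2
        rw [gFalse, hgT, hsk]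
        by_cases hnil : skipT (t.drop 3) = []
        · rw [if_neg (by simp [hnil]), gT_nil _ hnil, Jn, if_pos ((E_iff _).mpr hnil)]
        · rw [if_pos ⟨hpre, hsk ▸ hnil⟩, Jn, if_neg (fun hc => hnil ((E_iff _).mp hc))]
          rw [IH.2]
          simp
      · rw [hgT, hS, IH.2]
        simp
    · cases t with
      | nil => exact ih [] (by simp)
      | cons c r =>
        have IH := ih r (by simp at hN; omega)
        have hsk : skipT (c :: r) = c :: r := skipT_eq_self _ hpre
        obtain ⟨h', rest', hS'⟩ : ∃ h' rest', myAux r [] = h' :: rest' := by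
          cases hS : myAux r [] with
          | nil => exact absurd hS (S_ne_nil r)
          | cons a b => exact ⟨a, b, rfl⟩
        have hS : myAux (c :: r) [] = (c :: h') :: rest' := by
          rw [S_cons c r hpre, hS']; rfl
        have hgT : gT (c :: r) = c :: gFalse r := gT_cons _ c r hsk
        have haux : gFalse (c :: r) = gT (c :: r) := by
          rw [gFalse, if_neg (by simp [hpre])]; simp
        have hauxr : gFalse r = h' ++ Jn rest' := IH.1 h' rest' hS'
        constructor
        · intro h rest hrw
          rw [hS] at hrw
          injection hrw with h1 h2
          subst h1; subst h2
          rw [haux, hgT, hauxr]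
          simp
        · rw [hgT, hauxr, hS]
          simp only [List.filter_cons]
          rw [if_pos (by simp)]
          rw [inter_cons]
          rw [Jn]
          by_cases hrest : rest'.filter (fun l => l ≠ []) = []
          · rw [if_pos hrest]; simp
          · rw [if_neg hrest]; simp

theorem main_eq (t : List Char) :
    gT t = List.intercalate [' '] ((myAux t []).filter (fun l => l ≠ [])) :=
  (both_eq t.length t le_rfl).2

theorem ofList_decide_ne (l : List Char) :
    (decide (String.ofList l ≠ "")) = (decide (l ≠ [])) := by
  rw [decide_eq_decide]
  constructor
  · intro h hl; subst hl; exact h rfl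
  · intro h hs
    have h2 := congrArg String.toList hs
    rw [String.toList_ofList] at h2
    exact h (by simpa using h2)

-- ===== VERDICT (by name: the statement is the Claim_ definition above) =====
theorem song_decoder_spec : Claim_equal_song_decoder := by
  intro _text _dom
  unfold Spec_song_decoder song_decoder song_decoder_alt
  cases hsp : PySem.Str.split? _text "WUB" with
  | none =>
    exfalso
    rw [PySem.Str.split?, PySem.Chars.split?] at hsp
    simp at hsp
  | some parts =>
    have hparts : parts = List.map String.ofList (PySem.Chars.splitOn _text.toList pvW) := by
      rw [PySem.Str.split?, PySem.Chars.split?] at hsp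
      rw [show ("WUB" : String).toList = pvW from by decide] at hsp
      simp [pvW] at hsp
      exact hsp.symm
    subst hparts
    dsimp only
    have hfilter : (List.map String.ofList (PySem.Chars.splitOn _text.toList pvW)).filter (fun p => p ≠ "")
        = List.map String.ofList ((PySem.Chars.splitOn _text.toList pvW).filter (fun l => l ≠ [])) := by
      rw [List.filter_map]
      congr 1
      apply List.filter_congr
      intro l _
      rw [Function.comp_apply, ofList_decide_ne]
    rw [hfilter, PySem.Str.join]
    have hmap : List.map String.toList (List.map String.ofList
          ((PySem.Chars.splitOn _text.toList pvW).filter (fun l => l ≠ [])))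
        = (PySem.Chars.splitOn _text.toList pvW).filter (fun l => l ≠ []) := by
      rw [List.map_map]
      have hco : String.toList ∘ String.ofList = id := funext fun l => String.toList_ofList
      rw [hco, List.map_id]
    rw [hmap, PySem.Chars.join]
    rw [loopA_top]
    congr 1
    rw [main_eq, splitOn_eq]
    rfl
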